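-- pv_equiv track=rewrite | github.com/GaunC1/troy | ereader/backend/main.py | add_drop_caps
-- ===== SOURCE A (Python) =====
-- def add_drop_caps(html: str) -> str:
--     """Add drop-cap class to first paragraph and paragraphs after section breaks."""
--     # Add drop-cap to first <p> tag
--     first_p_replaced = False
--     result = []
--     lines = html.split('\n')
--     prev_was_hr = False
--
--     for line in lines:
--         if not first_p_replaced and line.strip().startswith('<p>'):
--             line = line.replace('<p>', '<p class="drop-cap">', 1)
--             first_p_replaced = True
--         elif prev_was_hr and line.strip().startswith('<p>'):
--             line = line.replace('<p>', '<p class="drop-cap">', 1)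
--             prev_was_hr = False
--
--         prev_was_hr = '<hr' in line.lower()
--         result.append(line)
--
--     return '\n'.join(result)
-- ===== SOURCE B (Python) =====
-- def add_drop_caps(html: str) -> str:
--     """Add drop-cap class to first paragraph and paragraphs after section breaks."""
--     DROP = '<p class="drop-cap">'
--     lines = html.split('\n')
--     # Stage 1: cut the document into sections; every '<hr' line closes a section.
--     sections = []
--     current = []
--     for line in lines:
--         current.append(line)
--         if '<hr' in line.lower():
--             sections.append(current)
--             current = []
--     sections.append(current)
--     # Stage 2: a paragraph that opens a section other than the first one follows a
--     # section break, so it gets a drop cap.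
--     styled = sections[:1] + [
--         [sec[0].replace('<p>', DROP, 1)] + sec[1:]
--         if sec and sec[0].strip().startswith('<p>') else sec
--         for sec in sections[1:]
--     ]
--     out = [line for sec in styled for line in sec]
--     # Stage 3: the first paragraph of the document gets a drop cap too, unless it
--     # already received one as a section opener.
--     for i, line in enumerate(lines):
--         if line.strip().startswith('<p>'):
--             if out[i] == line:
--                 out[i] = line.replace('<p>', DROP, 1)
--             break
--     return '\n'.join(out)
-- ===== Notes on version B (the rewrite author's own statement) =====
-- stated objective: alternative
-- what changed: Replaces A's single stateful pass (first_p_replaced/prev_was_hr flags threaded line by line) with a staged pipeline over a different structure: the lines are first grouped into sections delimited by '<hr' lines, each later section's opening paragraph line is styled by a map over sections, and a final scan patches the document's first paragraph line unless it was already styled as a section opener.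
import Mathlib
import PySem

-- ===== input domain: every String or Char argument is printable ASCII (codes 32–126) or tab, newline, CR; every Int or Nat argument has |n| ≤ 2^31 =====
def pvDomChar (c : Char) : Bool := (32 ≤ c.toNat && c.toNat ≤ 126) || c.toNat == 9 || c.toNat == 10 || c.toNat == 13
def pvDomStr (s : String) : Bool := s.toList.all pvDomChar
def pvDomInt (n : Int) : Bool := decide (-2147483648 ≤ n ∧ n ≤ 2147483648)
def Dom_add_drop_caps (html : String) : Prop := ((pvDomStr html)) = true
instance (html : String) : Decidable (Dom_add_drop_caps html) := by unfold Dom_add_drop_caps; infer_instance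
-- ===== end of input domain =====

-- B replaces A's single flag-threaded pass by a staged pipeline: cut the document into
-- sections at '<hr' lines, style each later section's opening paragraph, then patch the
-- document's first paragraph (objective: alternative decomposition, same cost).

-- shared primitive helpers (both Pythons call the same built-ins on the same values)
-- line.strip().startswith('<p>')
def pTest (l : String) : Bool := PySem.Str.startswith (PySem.Str.strip l) "<p>"
-- '<hr' in line.lower()
def hrTest (l : String) : Bool := PySem.Str.isIn "<hr" (PySem.Str.lower l)
-- s.replace(old, new, 1): hand port of Python's replace with count=1, exact for nonempty old
-- (first occurrence located by PySem.Chars.find = Python's str.find)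
def replaceFirst (s old new : String) : String :=
  let i := PySem.Chars.find s.toList old.toList
  if i < 0 then s
  else String.ofList (s.toList.take i.toNat ++ new.toList ++ s.toList.drop (i.toNat + old.toList.length))
-- line.replace('<p>', '<p class="drop-cap">', 1)
def trLine (l : String) : String := replaceFirst l "<p>" "<p class=\"drop-cap\">"

-- ===== PORT A =====
-- state = (first_p_replaced, prev_was_hr, result); prev_was_hr is recomputed from the
-- (possibly replaced) line at the end of every iteration, exactly as in A
def aStep (st : Bool × Bool × List String) (line : String) : Bool × Bool × List String :=
  let (fp, ph, res) := st
  if !fp && pTest line then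
    let line := trLine line
    (true, hrTest line, res ++ [line])
  else if ph && pTest line then
    let line := trLine line
    (fp, hrTest line, res ++ [line])
  else
    (fp, hrTest line, res ++ [line])

-- sep "\n" is nonempty, so split? is always some; getD only discharges the option
def add_drop_caps (html : String) : String :=
  let lines := (PySem.Str.split? html "\n").getD []
  let st := lines.foldl aStep (false, false, [])
  PySem.Str.join "\n" st.2.2

-- ===== PORT B =====
-- stage 1 loop body: current.append(line); if '<hr' in line.lower(): close the section
def secStep (st : List (List String) × List String) (line : String) : List (List String) × List String :=
  let cur := st.2 ++ [line]
  if hrTest line then (st.1 ++ [cur], []) else (st.1, cur)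

-- stage 2 comprehension body: style the section's opening line if it is a paragraph
def styleSec (sec : List String) : List String :=
  match sec with
  | [] => []
  | h :: t => if pTest h then trLine h :: t else h :: t

-- stage 3 loop: find the first paragraph line, patch it in place unless already styled,
-- then break.  'out[i] = …' is List.set at the (nonnegative) enumerate index.
def patch : List (Int × String) → List String → List String
  | [], out => out
  | (i, l) :: rest, out =>
    if pTest l then
      if PySem.List.pyGet? out i == some l then out.set i.toNat (trLine l) else out
    else patch rest out

-- sections[:1] / sections[1:] are the slices with nonnegative bounds
def add_drop_caps_alt (html : String) : String :=
  let lines := (PySem.Str.split? html "\n").getD []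
  let st := lines.foldl secStep ([], [])
  let sections := st.1 ++ [st.2]
  let styled := PySem.List.slice sections none (some 1)
      ++ (PySem.List.slice sections (some 1) none).map styleSec
  let out := styled.flatten
  PySem.Str.join "\n" (patch (PySem.List.enumerate lines) out)

-- ===== PRECONDITION & SPEC =====
def Spec_add_drop_caps (html : String) (out : String) : Prop := out = add_drop_caps_alt html
instance (html : String) (out : String) : Decidable (Spec_add_drop_caps html out) := by unfold Spec_add_drop_caps; infer_instance

-- ===== CLAIM (what is proved, stated in full; the proofs are below) =====
def Claim_equal_add_drop_caps : Prop := ∀ (html : String), Dom_add_drop_caps html → Spec_add_drop_caps html (add_drop_caps html)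

-- ===== LEMMAS AND PROOFS =====

-- canonical line-by-line forms used to relate the two pipelines --

-- lines once the first paragraph has been handled, previous-line-hr state = ph (original lines)
def spec1o : Bool → List String → List String
  | _, [] => []
  | ph, l :: ls => (if ph && pTest l then trLine l else l) :: spec1o (hrTest l) ls

-- lines while the first paragraph is still pending
def specFo : List String → List String
  | [] => []
  | l :: ls => if pTest l then trLine l :: spec1o (hrTest l) ls else l :: specFo ls

-- the same two machines as A computes them (hr state read off the replaced line)
def specA1 : Bool → List String → List String
  | _, [] => []
  | ph, l :: ls =>
    if ph && pTest l then trLine l :: specA1 (hrTest (trLine l)) ls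
    else l :: specA1 (hrTest l) ls

def specA2 : List String → List String
  | [] => []
  | l :: ls =>
    if pTest l then trLine l :: specA1 (hrTest (trLine l)) ls
    else l :: specA2 ls

-- recursive form of B's stage-1 fold
def secsOf : List String → List String → List (List String) × List String
  | cur, [] => ([], cur)
  | cur, l :: ls =>
    if hrTest l then ((cur ++ [l]) :: (secsOf [] ls).1, (secsOf [] ls).2)
    else secsOf (cur ++ [l]) ls

-- ---- string facts ----

theorem lowerChar_of_isspace (c : Char) (h : PySem.Chars.isspace c = true) :
    PySem.Chars.lowerChar c = c := by
  unfold PySem.Chars.lowerChar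
  rw [if_neg]
  intro hu
  simp only [PySem.Chars.isupper, Bool.and_eq_true, decide_eq_true_eq] at hu
  have h1 : 65 ≤ c.toNat := hu.1
  have h2 : c.toNat ≤ 90 := hu.2
  simp [PySem.Chars.isspace] at h
  omega

-- the first paragraph line decomposes as whitespace ++ '<p>' ++ rest, and that is where
-- str.find points, so replace(...,1) rewrites exactly there
theorem pTest_decomp (l : String) (h : pTest l = true) :
    ∃ ws rest : List Char,
      l.toList = ws ++ ['<', 'p', '>'] ++ rest ∧
      (∀ c ∈ ws, PySem.Chars.isspace c = true) ∧
      (trLine l).toList = ws ++ "<p class=\"drop-cap\">".toList ++ rest := by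
  have hsw : PySem.Chars.startswith (PySem.Chars.strip l.toList) "<p>".toList = true := by
    simpa [pTest, PySem.Str.startswith_eq, PySem.Str.toList_strip] using h
  rw [PySem.Chars.startswith_iff] at hsw
  -- strip = rstrip (lstrip); rstrip is a prefix, so '<p>' prefixes the left-stripped line
  have hpre : "<p>".toList <+: PySem.Chars.lstrip l.toList := by
    refine hsw.trans ?_
    show PySem.Chars.rstrip (PySem.Chars.lstrip l.toList) <+: PySem.Chars.lstrip l.toList
    unfold PySem.Chars.rstrip
    have := List.dropWhile_suffix (l := (PySem.Chars.lstrip l.toList).reverse)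
        (p := PySem.Chars.isspace)
    rw [← List.reverse_prefix] at this
    simpa using this
  set cs := l.toList with hcs
  set ws := cs.takeWhile PySem.Chars.isspace with hws
  obtain ⟨t, ht⟩ := hpre
  have hsplit : cs = ws ++ ['<', 'p', '>'] ++ t := by
    conv_lhs => rw [← List.takeWhile_append_dropWhile (p := PySem.Chars.isspace) (l := cs)]
    unfold PySem.Chars.lstrip at ht
    rw [← hws, ← ht]
    simp
  have hwsall : ∀ c ∈ ws, PySem.Chars.isspace c = true := fun c hc => List.mem_takeWhile_imp hc
  refine ⟨ws, t, hsplit, hwsall, ?_⟩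
  -- find cs '<p>' = ws.length
  have hinf : "<p>".toList <:+: cs := ⟨ws, t, by rw [hsplit]; simp⟩
  have hnn : 0 ≤ PySem.Chars.find cs "<p>".toList := (PySem.Chars.find_nonneg_iff _ _).mpr hinf
  obtain ⟨hat, hmin⟩ := PySem.Chars.find_spec hnn
  set f := (PySem.Chars.find cs "<p>".toList).toNat with hf
  have hfeq : f = ws.length := by
    by_contra hne
    rcases Nat.lt_or_ge f ws.length with hlt | hge
    · -- find landed inside the whitespace: its char would be '<'
      have hdrop : cs.drop f = ws[f] :: (ws.drop (f+1) ++ (['<','p','>'] ++ t)) := by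
        rw [hsplit, List.append_assoc, List.drop_append_of_le_length (by omega)]
        rw [List.drop_eq_getElem_cons hlt]
        simp only [List.cons_append]
      have hat2 : ['<','p','>'] <+: cs.drop f := hat
      rw [hdrop] at hat2
      have : '<' = ws[f] := ((List.cons_prefix_cons).mp hat2).1
      have hsp := hwsall ws[f] (List.getElem_mem hlt)
      rw [← this] at hsp
      simp [PySem.Chars.isspace] at hsp
    · have hgt : ws.length < f := by omega
      exact hmin ws.length hgt (by rw [hsplit, List.append_assoc]; simp)
  -- now compute the replacement
  have hfind : PySem.Chars.find cs "<p>".toList = (ws.length : Int) := by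
    omega
  unfold trLine replaceFirst
  rw [← hcs, hfind]
  rw [if_neg (by omega)]
  have htake : cs.take ws.length = ws := by rw [hsplit, List.append_assoc]; simp
  have hdrop3 : cs.drop (ws.length + 3) = t := by
    rw [hsplit, List.append_assoc, List.drop_append]
    simp
  simp only [Int.toNat_natCast]
  rw [String.toList_ofList]
  show cs.take ws.length ++ _ ++ cs.drop (ws.length + 3) = _
  rw [htake, hdrop3]

-- a replaced line is never equal to the original (the class attribute is longer)
theorem trLine_ne (l : String) (h : pTest l = true) : trLine l ≠ l := by
  obtain ⟨ws, rest, hl, _, htr⟩ := pTest_decomp l h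
  intro he
  have : (trLine l).toList = l.toList := by rw [he]
  rw [htr, hl] at this
  have := congrArg List.length this
  simp at this
  omega

-- straddling facts: no '<hr' occurrence can start inside '<p>' or '<p class="drop-cap">'
theorem noHR_ppp : ∀ (k : Nat) (t : List Char), k < 3 →
    ¬ (['<','h','r'] <+: ((['<','p','>'] : List Char).drop k ++ t)) := by
  intro k t hk h
  interval_cases k <;> simp [List.cons_prefix_cons] at h
theorem noHR_dcc : ∀ (k : Nat) (t : List Char), k < 20 →
    ¬ (['<','h','r'] <+: ("<p class=\"drop-cap\">".toList.drop k ++ t)) := by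
  intro k t hk h
  interval_cases k <;> simp [List.cons_prefix_cons] at h

-- an '<hr' occurrence in ws ++ m ++ b (ws whitespace, m straddle-free) is one in b
theorem isIn_ws_mid (ws m b : List Char)
    (hws : ∀ c ∈ ws, PySem.Chars.isspace c = true)
    (hm : ∀ (k : Nat) (t : List Char), k < m.length → ¬ (['<','h','r'] <+: (m.drop k ++ t))) :
    PySem.Chars.isIn ['<','h','r'] (ws ++ m ++ b) = PySem.Chars.isIn ['<','h','r'] b := by
  cases hb : PySem.Chars.isIn ['<','h','r'] b with
  | true =>
    rw [PySem.Chars.isIn_iff_infix] at hb ⊢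
    exact hb.trans (List.suffix_append _ b).isInfix
  | false =>
    by_contra hne
    have hLT : PySem.Chars.isIn ['<','h','r'] (ws ++ m ++ b) = true := by
      cases hx : PySem.Chars.isIn "<hr".toList (ws ++ m ++ b) <;> simp_all
    obtain ⟨j, hj⟩ := (PySem.Chars.exists_prefix_drop_iff_isIn _ _).mpr hLT
    rw [List.append_assoc, List.drop_append, List.drop_append] at hj
    rcases Nat.lt_or_ge j ws.length with hlt | hge
    · have hdrop : ws.drop j = ws[j] :: ws.drop (j+1) := List.drop_eq_getElem_cons hlt
      rw [hdrop, Nat.sub_eq_zero_of_le (by omega), Nat.sub_eq_zero_of_le (by omega)] at hj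
      simp only [List.drop_zero, List.cons_append] at hj
      have : '<' = ws[j] := ((List.cons_prefix_cons).mp hj).1
      have hsp := hws ws[j] (List.getElem_mem hlt)
      rw [← this] at hsp
      simp [PySem.Chars.isspace] at hsp
    · rw [List.drop_eq_nil_of_le hge] at hj
      simp only [List.nil_append] at hj
      rcases Nat.lt_or_ge (j - ws.length) m.length with hk | hk
      · exact hm _ _ hk hj
      · rw [List.drop_eq_nil_of_le hk] at hj
        simp only [List.nil_append] at hj
        have : PySem.Chars.isIn ['<','h','r'] b = true := by
          rw [PySem.Chars.isIn_iff_infix]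
          exact hj.isInfix.trans (List.drop_suffix _ b).isInfix
        simp [this] at hb

-- replacing the paragraph tag does not change whether the line contains '<hr'
theorem hrTest_trLine (l : String) (h : pTest l = true) : hrTest (trLine l) = hrTest l := by
  obtain ⟨ws, rest, hl, hws, htr⟩ := pTest_decomp l h
  have hmapws : ws.map PySem.Chars.lowerChar = ws :=
    (List.map_congr_left fun c hc => lowerChar_of_isspace c (hws c hc)).trans (List.map_id ws)
  have hwsl : ∀ c ∈ ws, PySem.Chars.isspace c = true := hws
  unfold hrTest
  rw [PySem.Str.isIn_eq, PySem.Str.isIn_eq, PySem.Str.toList_lower, PySem.Str.toList_lower,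
    hl, htr]
  unfold PySem.Chars.lower
  rw [List.map_append, List.map_append, List.map_append, List.map_append, hmapws]
  have hppp : (['<','p','>'] : List Char).map PySem.Chars.lowerChar = ['<','p','>'] := by decide
  have hdcc : ("<p class=\"drop-cap\">".toList).map PySem.Chars.lowerChar
      = "<p class=\"drop-cap\">".toList := by decide
  rw [hppp, hdcc]
  show PySem.Chars.isIn ['<','h','r'] _ = PySem.Chars.isIn ['<','h','r'] _
  rw [isIn_ws_mid ws _ _ hwsl (fun k t hk => noHR_dcc k t (by simpa using hk)),
    isIn_ws_mid ws _ _ hwsl (fun k t hk => noHR_ppp k t (by simpa using hk))]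

-- ---- A's machine equals the original-line machine ----

theorem specA1_eq (ls : List String) : ∀ ph, specA1 ph ls = spec1o ph ls := by
  induction ls with
  | nil => intro ph; rfl
  | cons l ls ih =>
    intro ph
    simp only [specA1, spec1o]
    cases hp : (ph && pTest l) with
    | false => simp [ih]
    | true =>
      have hP : pTest l = true := by revert hp; cases pTest l <;> simp
      simp [hrTest_trLine l hP, ih]

theorem specA2_eq (ls : List String) : specA2 ls = specFo ls := by
  induction ls with
  | nil => rfl
  | cons l ls ih =>
    simp only [specA2, specFo]
    by_cases hp : pTest l = true
    · simp [hp, hrTest_trLine l hp, specA1_eq]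
    · simp [hp, ih]

theorem A_loop (ls : List String) : ∀ (fp ph : Bool) (res : List String),
    (ls.foldl aStep (fp, ph, res)).2.2
      = res ++ (if fp then specA1 ph ls else specA2 ls) := by
  induction ls with
  | nil => intro fp ph res; cases fp <;> simp [specA1, specA2]
  | cons l ls ih =>
    intro fp ph res
    cases fp with
    | false =>
      by_cases hp : pTest l = true
      · simp only [List.foldl_cons, aStep, hp, Bool.not_false, Bool.true_and, if_true]
        rw [ih]
        simp [specA2, hp]
      · simp only [List.foldl_cons, aStep, hp]
        simp only [Bool.not_false, Bool.true_and, Bool.and_eq_true]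
        rw [if_neg (by simp), if_neg (by simp)]
        rw [ih]
        simp [specA2, hp]
    | true =>
      by_cases hp : (ph && pTest l) = true
      · simp only [List.foldl_cons, aStep, Bool.not_true, Bool.false_and, Bool.false_eq_true,
          if_false, hp, if_true]
        rw [ih]
        simp [specA1, hp]
      · simp only [List.foldl_cons, aStep, Bool.not_true, Bool.false_and, Bool.false_eq_true,
          if_false, hp]
        rw [ih]
        simp [specA1, hp]

-- ---- B's stages equal the original-line machine ----

theorem fold_secStep (ls : List String) : ∀ (secs : List (List String)) (cur : List String),
    ls.foldl secStep (secs, cur) = (secs ++ (secsOf cur ls).1, (secsOf cur ls).2) := by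
  induction ls with
  | nil => intro secs cur; simp [secsOf]
  | cons l ls ih =>
    intro secs cur
    by_cases hh : hrTest l = true
    · simp only [List.foldl_cons, secStep, hh, if_true, secsOf]
      rw [ih]
      simp
    · simp only [List.foldl_cons, secStep, hh, Bool.false_eq_true, if_false, secsOf]
      rw [ih]

-- all sections (current one included): heads of closed sections get styled
theorem secs_later (ls : List String) : ∀ (cur : List String),
    (((secsOf cur ls).1 ++ [(secsOf cur ls).2]).map styleSec).flatten
      = styleSec cur ++ spec1o cur.isEmpty ls := by
  induction ls with
  | nil => intro cur; simp [secsOf, spec1o]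
  | cons l ls ih =>
    intro cur
    by_cases hh : hrTest l = true
    · simp only [secsOf, hh, if_true, List.cons_append, List.map_cons, List.flatten_cons]
      rw [ih []]
      cases cur with
      | nil => by_cases hp : pTest l = true <;> simp [styleSec, spec1o, hh, hp]
      | cons h t =>
        simp only [styleSec, spec1o, List.isEmpty_cons, Bool.false_and, Bool.false_eq_true,
          if_false, hh]
        by_cases hp : pTest h = true <;> simp [hp]
    · simp only [secsOf, hh, Bool.false_eq_true, if_false]
      rw [ih (cur ++ [l])]
      cases cur with
      | nil => by_cases hp : pTest l = true <;> simp [styleSec, spec1o, hh, hp]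
      | cons h t =>
        simp only [styleSec, spec1o, List.isEmpty_cons, Bool.false_and, Bool.false_eq_true,
          if_false, hh, List.cons_append]
        by_cases hp : pTest h = true <;> simp [hp]

-- the whole styled document: the first section is left alone
theorem secs_first (ls : List String) : ∀ (cur : List String),
    ((((secsOf cur ls).1 ++ [(secsOf cur ls).2]).take 1
      ++ (((secsOf cur ls).1 ++ [(secsOf cur ls).2]).drop 1).map styleSec).flatten)
      = cur ++ spec1o false ls := by
  induction ls with
  | nil => intro cur; simp [secsOf, spec1o]
  | cons l ls ih =>
    intro cur
    by_cases hh : hrTest l = true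
    · simp only [secsOf, hh, if_true, List.cons_append, List.take_succ_cons, List.take_zero,
        List.drop_succ_cons, List.drop_zero, spec1o]
      simp only [List.nil_append, List.flatten_cons]
      rw [secs_later ls []]
      simp [styleSec]
    · simp only [secsOf, hh, Bool.false_eq_true, if_false, spec1o]
      rw [ih (cur ++ [l])]
      simp
  -- note: termination is structural on ls in both branches

-- stage 3: patching the first paragraph turns spec1o into specFo
theorem get_mid (pre rest : List String) (x : String) :
    PySem.List.pyGet? (pre ++ x :: rest) ((pre.length : Nat) : Int) = some x := by
  rw [PySem.List.pyGet?_natCast]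
  simp

theorem set_mid (pre rest : List String) (x y : String) :
    (pre ++ x :: rest).set pre.length y = pre ++ y :: rest := by
  rw [List.set_append_right _ _ (le_refl _)]
  simp

theorem patch_loop (ls : List String) : ∀ (ph : Bool) (pre : List String),
    patch (PySem.List.enumerate ls (pre.length : Int)) (pre ++ spec1o ph ls)
      = pre ++ specFo ls := by
  induction ls with
  | nil =>
    intro ph pre
    simp [PySem.List.enumerate_nil, spec1o, specFo, patch]
  | cons l ls ih =>
    intro ph pre
    rw [PySem.List.enumerate_cons]
    by_cases hp : pTest l = true
    · -- paragraph line found: patch stops here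
      have hget := get_mid pre (spec1o (hrTest l) ls) (if ph && pTest l then trLine l else l)
      simp only [hp, Bool.and_true] at hget
      simp only [spec1o, specFo, patch, hp, if_true, Bool.and_true]
      cases ph with
      | true =>
        simp only [if_true] at hget ⊢
        rw [hget]
        have hne : ((some (trLine l) == some l)) = false := by
          simp [trLine_ne l hp]
        rw [hne]
        simp
      | false =>
        simp only [Bool.false_eq_true, if_false] at hget ⊢
        rw [hget]
        have heq : ((some l == some l)) = true := by simp
        rw [heq]
        simp only [if_true, Int.toNat_natCast]
        rw [set_mid]
    · -- not a paragraph: scan on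
      simp only [spec1o, specFo, patch, hp, Bool.and_false, Bool.false_eq_true, if_false]
      have hlen : (pre.length : Int) + 1 = (((pre ++ [l]).length : Nat) : Int) := by
        simp
      rw [hlen]
      have := ih (hrTest l) (pre ++ [l])
      simp only [List.append_assoc, List.cons_append, List.nil_append] at this ⊢
      exact this

-- ===== VERDICT (by name: the statement is the Claim_ definition above) =====
theorem add_drop_caps_spec : Claim_equal_add_drop_caps := by
  intro html _
  unfold Spec_add_drop_caps add_drop_caps add_drop_caps_alt
  dsimp only
  set lines := (PySem.Str.split? html "\n").getD [] with hlines
  congr 1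
  -- A's side
  rw [A_loop lines false false []]
  simp only [Bool.false_eq_true, if_false, List.nil_append]
  rw [specA2_eq]
  -- B's side
  rw [fold_secStep lines [] []]
  simp only [List.nil_append]
  rw [PySem.List.slice_to _ (by omega), PySem.List.slice_from _ (by omega)]
  simp only [Int.toNat_one]
  rw [secs_first lines []]
  simp only [List.nil_append]
  have := patch_loop lines false []
  simp only [List.length_nil, Nat.cast_zero, List.nil_append] at this
  rw [this]
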